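-- pv_equiv track=rewrite | github.com/autorevit/Autorevit-Extension | lib/core/verification_engine.py | _get_max_severity
-- ===== SOURCE A (Python) =====
-- def _get_max_severity(checks):
--     """Récupère la sévérité maximale des vérifications."""
--     severity_order = {'CRITICAL': 4, 'ERROR': 3, 'WARNING': 2, 'INFO': 1, 'PASS': 0}
--     max_severity = 'PASS'
--     max_level = 0
--
--     for check in checks:
--         status = check.get('status', 'PASS')
--         level = severity_order.get(status, 0)
--         if level > max_level:
--             max_level = level
--             max_severity = status
--
--     return max_severity
-- ===== SOURCE B (Python) =====
-- def _get_max_severity(checks):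
--     """Collect the distinct statuses once, then scan severity names from highest
--     to lowest and return the first one present (return-value equivalent)."""
--     statuses = {c.get('status', 'PASS') for c in checks}
--     for name in ('CRITICAL', 'ERROR', 'WARNING', 'INFO'):
--         if name in statuses:
--             return name
--     return 'PASS'
-- ===== Notes on version B (the rewrite author's own statement) =====
-- stated objective: simpler
-- what changed: Instead of one accumulating pass keeping a running (status, level) maximum, B builds the set of distinct statuses once and then scans the fixed severity names from highest to lowest, returning the first one present; the numeric severity table disappears entirely.
import Mathlib
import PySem

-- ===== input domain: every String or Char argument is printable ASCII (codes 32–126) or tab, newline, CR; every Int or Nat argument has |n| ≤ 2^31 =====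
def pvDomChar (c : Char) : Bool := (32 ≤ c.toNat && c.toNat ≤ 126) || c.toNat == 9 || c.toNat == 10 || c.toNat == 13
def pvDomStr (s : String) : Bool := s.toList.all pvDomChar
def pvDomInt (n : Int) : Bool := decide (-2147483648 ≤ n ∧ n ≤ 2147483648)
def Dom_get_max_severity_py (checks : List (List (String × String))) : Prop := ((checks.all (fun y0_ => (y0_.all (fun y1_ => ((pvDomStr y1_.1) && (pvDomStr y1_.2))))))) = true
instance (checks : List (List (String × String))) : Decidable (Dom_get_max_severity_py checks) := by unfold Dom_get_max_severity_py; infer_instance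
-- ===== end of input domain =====

-- B replaces the running (status, level) maximum by a distinct-status set plus a
-- highest-to-lowest scan of the fixed severity names (objective: simpler).

-- ===== PORT A =====
-- severity_order = {'CRITICAL': 4, 'ERROR': 3, 'WARNING': 2, 'INFO': 1, 'PASS': 0}
def sevOrder : PySem.Dict String Int :=
  PySem.Dict.ofList [("CRITICAL", 4), ("ERROR", 3), ("WARNING", 2), ("INFO", 1), ("PASS", 0)]

-- check.get('status', 'PASS')  (the check dict is the association list itself)
def statusOf (check : List (String × String)) : String :=
  PySem.Dict.getD (PySem.Dict.mk check) "status" "PASS"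

def get_max_severity_py (checks : List (List (String × String))) : String :=
  (checks.foldl
    (fun (st : String × Int) check =>
      let status := statusOf check
      let level := PySem.Dict.getD sevOrder status 0
      if st.2 < level then (status, level) else st)
    ("PASS", 0)).1

-- ===== PORT B =====
def get_max_severity_py_alt (checks : List (List (String × String))) : String :=
  -- statuses = {c.get('status', 'PASS') for c in checks}
  let statuses : PySem.Set String := PySem.Set.ofList (checks.map statusOf)
  -- for name in ('CRITICAL','ERROR','WARNING','INFO'): if name in statuses: return name
  match ["CRITICAL", "ERROR", "WARNING", "INFO"].find?
      (fun name => PySem.Set.contains statuses name) with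
  | some name => name
  | none => "PASS"

-- ===== PRECONDITION & SPEC =====
def Spec_get_max_severity_py (checks : List (List (String × String))) (out : String) : Prop := out = get_max_severity_py_alt checks
instance (checks : List (List (String × String))) (out : String) : Decidable (Spec_get_max_severity_py checks out) := by unfold Spec_get_max_severity_py; infer_instance

-- ===== CLAIM =====
def Claim_equal_get_max_severity_py : Prop := ∀ (checks : List (List (String × String))), Dom_get_max_severity_py checks → Spec_get_max_severity_py checks (get_max_severity_py checks)

-- ===== LEMMAS AND PROOFS =====

-- the "first severity name present" as an if-chain over any-tests, numerically
def gLev (checks : List (List (String × String))) : Int :=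
  if checks.any (fun c => statusOf c == "CRITICAL") then 4
  else if checks.any (fun c => statusOf c == "ERROR") then 3
  else if checks.any (fun c => statusOf c == "WARNING") then 2
  else if checks.any (fun c => statusOf c == "INFO") then 1
  else 0

-- the canonical name of a level
def nameOf (n : Int) : String :=
  if n = 4 then "CRITICAL" else if n = 3 then "ERROR" else if n = 2 then "WARNING"
  else if n = 1 then "INFO" else "PASS"

-- sevOrder lookup as an if-chain
theorem sev_eq (s : String) :
    PySem.Dict.getD sevOrder s 0 =
      if s = "CRITICAL" then 4 else if s = "ERROR" then 3 else if s = "WARNING" then 2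
      else if s = "INFO" then 1 else 0 := by
  by_cases h1 : s = "CRITICAL"
  · subst h1; decide
  by_cases h2 : s = "ERROR"
  · subst h2; decide
  by_cases h3 : s = "WARNING"
  · subst h3; decide
  by_cases h4 : s = "INFO"
  · subst h4; decide
  by_cases h5 : s = "PASS"
  · subst h5; decide
  have h : sevOrder = PySem.Dict.mk [("CRITICAL", 4), ("ERROR", 3), ("WARNING", 2), ("INFO", 1), ("PASS", 0)] := by decide
  rw [h]
  have g1 : ¬("CRITICAL" = s) := fun e => h1 e.symm
  have g2 : ¬("ERROR" = s) := fun e => h2 e.symm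
  have g3 : ¬("WARNING" = s) := fun e => h3 e.symm
  have g4 : ¬("INFO" = s) := fun e => h4 e.symm
  have g5 : ¬("PASS" = s) := fun e => h5 e.symm
  simp [PySem.Dict.getD_eq_get?_getD, h1, h2, h3, h4,
    g1, g2, g3, g4, g5, PySem.Dict.get?]

theorem sev_nonneg (s : String) : 0 ≤ PySem.Dict.getD sevOrder s 0 := by
  rw [sev_eq]; split_ifs <;> norm_num

theorem gLev_nonneg (checks : List (List (String × String))) : 0 ≤ gLev checks := by
  unfold gLev; split_ifs <;> norm_num

-- one step of gLev
theorem gLev_cons (c : List (String × String)) (rest : List (List (String × String))) :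
    gLev (c :: rest) = max (PySem.Dict.getD sevOrder (statusOf c) 0) (gLev rest) := by
  have hr := gLev_nonneg rest
  rw [sev_eq]
  unfold gLev at *
  simp only [List.any_cons, Bool.or_eq_true, beq_iff_eq]
  by_cases h1 : statusOf c = "CRITICAL"
  · simp [h1]; split_ifs at hr ⊢ <;> omega
  by_cases h2 : statusOf c = "ERROR"
  · simp [h2]; split_ifs at hr ⊢ <;> omega
  by_cases h3 : statusOf c = "WARNING"
  · simp [h3]; split_ifs at hr ⊢ <;> omega
  by_cases h4 : statusOf c = "INFO"
  · simp [h4]; split_ifs at hr ⊢ <;> omega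
  · simp [h1, h2, h3, h4]; split_ifs at hr ⊢ <;> omega

-- A''s running max equals the chain value
theorem fold_max_eq (checks : List (List (String × String))) (n : Int) (h0 : 0 ≤ n) :
    checks.foldl (fun m c => max m (PySem.Dict.getD sevOrder (statusOf c) 0)) n
      = max n (gLev checks) := by
  induction checks generalizing n with
  | nil => unfold gLev; simp; omega
  | cons c rest ih =>
    simp only [List.foldl_cons]
    rw [ih _ (by have := sev_nonneg (statusOf c); omega), gLev_cons]
    omega

-- a status with a positive level is the canonical name of that level
theorem nameOf_sev (s : String) (h : 0 < PySem.Dict.getD sevOrder s 0) :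
    nameOf (PySem.Dict.getD sevOrder s 0) = s := by
  rw [sev_eq] at *
  unfold nameOf
  split_ifs at * with h1 h2 h3 h4 <;> simp_all

-- the A loop carries exactly (name of the running max, the running max)
theorem foldA (checks : List (List (String × String))) (s : String) (n : Int)
    (hs : nameOf n = s) (h0 : 0 ≤ n) :
    checks.foldl
      (fun (st : String × Int) check =>
        let status := statusOf check
        let level := PySem.Dict.getD sevOrder status 0
        if st.2 < level then (status, level) else st)
      (s, n)
    = (nameOf (checks.foldl (fun m c => max m (PySem.Dict.getD sevOrder (statusOf c) 0)) n),
       checks.foldl (fun m c => max m (PySem.Dict.getD sevOrder (statusOf c) 0)) n) := by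
  induction checks generalizing s n with
  | nil => simp [hs]
  | cons c rest ih =>
    simp only [List.foldl_cons]
    by_cases h : n < PySem.Dict.getD sevOrder (statusOf c) 0
    · rw [if_pos h]
      have hmax : max n (PySem.Dict.getD sevOrder (statusOf c) 0)
          = PySem.Dict.getD sevOrder (statusOf c) 0 := by omega
      rw [hmax]
      exact ih _ _ (nameOf_sev _ (by omega)) (by omega)
    · rw [if_neg h]
      have hmax : max n (PySem.Dict.getD sevOrder (statusOf c) 0) = n := by omega
      rw [hmax]
      exact ih _ _ hs h0

-- membership in the status set is an any-test over the checks
theorem contains_statuses (checks : List (List (String × String))) (name : String) :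
    PySem.Set.contains (PySem.Set.ofList (checks.map statusOf)) name
      = checks.any (fun c => statusOf c == name) := by
  rw [Bool.eq_iff_iff]
  simp only [PySem.Set.contains_iff, PySem.Set.mem_ofList, List.mem_map,
    List.any_eq_true, beq_iff_eq]

-- ===== VERDICT =====
theorem get_max_severity_py_spec : Claim_equal_get_max_severity_py := by
  intro checks _
  unfold Spec_get_max_severity_py get_max_severity_py get_max_severity_py_alt
  rw [foldA checks "PASS" 0 (by decide) le_rfl]
  rw [fold_max_eq checks 0 le_rfl]
  have hg := gLev_nonneg checks
  have hmax : max (0 : Int) (gLev checks) = gLev checks := by omega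
  rw [hmax]
  simp only [contains_statuses]
  unfold gLev at *
  by_cases b1 : checks.any (fun c => statusOf c == "CRITICAL")
  · simp [b1, List.find?, nameOf]
  by_cases b2 : checks.any (fun c => statusOf c == "ERROR")
  · simp [b1, b2, List.find?, nameOf]
  by_cases b3 : checks.any (fun c => statusOf c == "WARNING")
  · simp [b1, b2, b3, List.find?, nameOf]
  by_cases b4 : checks.any (fun c => statusOf c == "INFO")
  · simp [b1, b2, b3, b4, List.find?, nameOf]
  · simp [b1, b2, b3, b4, List.find?, nameOf]
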